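-- pv_equiv track=rewrite | github.com/mlaguayojr/advent_of_code | 2022/03.py | calc_points
-- ===== SOURCE A (Python) =====
-- def is_between(min_value :int, value :int, max_value :int) -> bool:
--     check1 = min_value <= value
--     check2 = value <= max_value
--     return check1 and check2
--
-- def calc_points(shared_items :list) -> int:
--     points = 0
--
--     for x in shared_items:
--         num_value = ord(str(x))
--
--         if is_between(1, num_value - 96, 26):
--             points += num_value - 96
--
--         elif is_between(27, num_value - 38, 52):
--             points += num_value - 38
--
--     return points
-- ===== SOURCE B (Python) =====
-- def calc_points(shared_items: list) -> int:
--     letters = "abcdefghijklmnopqrstuvwxyzABCDEFGHIJKLMNOPQRSTUVWXYZ"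
--     counts = {}
--     for x in shared_items:
--         k = ord(str(x))
--         counts[k] = counts.get(k, 0) + 1
--     return sum((i + 1) * counts.get(ord(c), 0) for i, c in enumerate(letters))
-- ===== Notes on version B (the rewrite author's own statement) =====
-- stated objective: alternative
-- what changed: B first builds a histogram (dict) of ord(str(x)) codes over the items and then computes the answer in a second pass over the 52-letter alphabet, summing priority*count per letter, instead of A's single pass that classifies each item with two range checks and offset arithmetic.
import Mathlib
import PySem

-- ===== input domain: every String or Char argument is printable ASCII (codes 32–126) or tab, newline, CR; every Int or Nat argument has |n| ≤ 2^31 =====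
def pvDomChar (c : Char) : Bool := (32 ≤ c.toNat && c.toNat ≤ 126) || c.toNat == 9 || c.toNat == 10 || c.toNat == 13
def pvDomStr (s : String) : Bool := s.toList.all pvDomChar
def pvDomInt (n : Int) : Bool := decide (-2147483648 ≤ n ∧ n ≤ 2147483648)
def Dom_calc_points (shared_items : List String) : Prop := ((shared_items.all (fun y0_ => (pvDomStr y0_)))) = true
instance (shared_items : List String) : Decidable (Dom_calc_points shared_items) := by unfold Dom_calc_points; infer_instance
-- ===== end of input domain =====

set_option maxRecDepth 8000

-- B builds a histogram of character codes first and then takes a weighted sum over the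
-- 52-letter alphabet, instead of A's per-item range checks; return values only, no mutation.

-- ===== PORT A =====
def is_between (min_value : Int) (value : Int) (max_value : Int) : Bool :=
  let check1 := decide (min_value ≤ value)
  let check2 := decide (value ≤ max_value)
  check1 && check2

def calc_points (shared_items : List String) : Int :=
  shared_items.foldl (fun points x =>
    -- ord(str(x)): x is a string, so str(x) = x; ord raises unless x has exactly one
    -- character (excluded by Pre_), whose code point it returns.
    match x.toList with
    | [c] =>
      let num_value : Int := (c.toNat : Int)
      if is_between 1 (num_value - 96) 26 then points + (num_value - 96)
      else if is_between 27 (num_value - 38) 52 then points + (num_value - 38)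
      else points
    | _ => points) 0

-- ===== PORT B =====
def pvLetters : List Char := "abcdefghijklmnopqrstuvwxyzABCDEFGHIJKLMNOPQRSTUVWXYZ".toList

-- ord(str(x)): the code point of a single-character string; -1 (never a letter code)
-- where Python's ord raises TypeError (such inputs are excluded by Pre_).
def pvOrdKey (cs : List Char) : Int :=
  if cs.length = 1 then ((cs.headD 'a').toNat : Int) else -1

def calc_points_alt (shared_items : List String) : Int :=
  let counts : PySem.Dict Int Int :=
    shared_items.foldl (fun d x =>
      let k := pvOrdKey x.toList
      d.insert k (d.getD k 0 + 1)) PySem.Dict.empty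
  (PySem.List.enumerate pvLetters).foldl
    (fun acc p => acc + (p.1 + 1) * counts.getD ((p.2.toNat : Int)) 0) 0

-- ===== PRECONDITION & SPEC =====
-- Pre_ excludes lists containing a string whose length is not 1: there ord(str(x))
-- raises TypeError in both A and B.
def Pre_calc_points (shared_items : List String) : Prop :=
  (shared_items.all (fun s => s.toList.length == 1)) = true
instance (shared_items : List String) : Decidable (Pre_calc_points shared_items) := by
  unfold Pre_calc_points; infer_instance

def pvWitness_calc_points : List String := ["a", "Z", "%"]

def Spec_calc_points (shared_items : List String) (out : Int) : Prop := out = calc_points_alt shared_items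
instance (shared_items : List String) (out : Int) : Decidable (Spec_calc_points shared_items out) := by unfold Spec_calc_points; infer_instance

-- ===== CLAIM (what is proved, stated in full; the proofs are below) =====
def Claim_equal_calc_points : Prop := ∀ (shared_items : List String), Dom_calc_points shared_items → Pre_calc_points shared_items → Spec_calc_points shared_items (calc_points shared_items)

-- ===== LEMMAS AND PROOFS =====

-- A's per-item contribution, as a function of the character code.
def contribA (n : Nat) : Int :=
  let num_value : Int := (n : Int)
  if is_between 1 (num_value - 96) 26 then num_value - 96
  else if is_between 27 (num_value - 38) 52 then num_value - 38
  else 0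

-- B's per-code weight: the sum of priorities of the letters whose code is k.
def pvWeight (k : Int) : Int :=
  ((PySem.List.enumerate pvLetters).map
    (fun p => if ((p.2.toNat : Int)) = k then p.1 + 1 else 0)).sum

theorem weight_eq_contrib : ∀ n : Nat, n < 127 → pvWeight (n : Int) = contribA n := by decide

theorem sum_delta (L : List (Int × Char)) (k : Int) (ks : List Int) :
    (L.map (fun p => (p.1 + 1) * (((k :: ks).count ((p.2.toNat : Int))) : Int))).sum
      = (L.map (fun p => (p.1 + 1) * ((ks.count ((p.2.toNat : Int))) : Int))).sum
        + (L.map (fun p => if ((p.2.toNat : Int)) = k then p.1 + 1 else 0)).sum := by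
  induction L with
  | nil => simp
  | cons a t ih =>
    simp only [List.map_cons, List.sum_cons, ih]
    have hc : (((k :: ks).count ((a.2.toNat : Int))) : Int)
        = (ks.count ((a.2.toNat : Int)) : Int) + (if ((a.2.toNat : Int)) = k then 1 else 0) := by
      rw [List.count_cons]
      by_cases h : ((a.2.toNat : Int)) = k
      · simp [h]
      · simp [h, Ne.symm h]
    rw [hc]
    by_cases h : ((a.2.toNat : Int)) = k
    · rw [if_pos h, if_pos h]; ring
    · rw [if_neg h, if_neg h]; ring

-- the histogram loop of B, characterised: its lookup is a count of the mapped keys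
theorem getD_fold_key (l : List String) (d : PySem.Dict Int Int) (v : Int) :
    (l.foldl (fun d x =>
        let k := pvOrdKey x.toList
        d.insert k (d.getD k 0 + 1)) d).getD v 0
      = d.getD v 0 + ((l.map (fun x => pvOrdKey x.toList)).count v : Int) := by
  induction l generalizing d with
  | nil => simp
  | cons x t ih =>
    simp only [List.foldl_cons, ih, List.map_cons]
    rw [PySem.Dict.getD_insert, List.count_cons]
    by_cases h : v = pvOrdKey x.toList
    · simp only [h, beq_self_eq_true, if_true]
      push_cast; ring
    · rw [if_neg h, if_neg (by simp [Ne.symm h])]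
      push_cast; ring

-- main sum identity: per-item contributions = weighted counts
theorem sum_contrib_eq (sh : List String)
    (h : ∀ x ∈ sh, pvDomStr x = true ∧ (x.toList.length == 1) = true) :
    (sh.map (fun x => contribA ((x.toList.headD 'a').toNat))).sum
      = ((PySem.List.enumerate pvLetters).map
          (fun p => (p.1 + 1) * (((sh.map (fun x => pvOrdKey x.toList)).count ((p.2.toNat : Int))) : Int))).sum := by
  induction sh with
  | nil => simp
  | cons x t ih =>
    have hx := h x (List.mem_cons_self)
    have ht : ∀ y ∈ t, pvDomStr y = true ∧ (y.toList.length == 1) = true :=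
      fun y hy => h y (List.mem_cons_of_mem _ hy)
    obtain ⟨c, heq⟩ : ∃ c, x.toList = [c] := by
      rcases hx.2 with h1
      cases hxl : x.toList with
      | nil => simp [hxl] at h1
      | cons a s => cases s with
        | nil => exact ⟨a, rfl⟩
        | cons b s' => simp [hxl] at h1
    have hlt : c.toNat < 127 := by
      have := hx.1
      unfold pvDomStr at this; rw [heq] at this
      simp [pvDomChar] at this; omega
    have hkey : pvOrdKey x.toList = (c.toNat : Int) := by
      simp [pvOrdKey, heq]
    simp only [List.map_cons, List.sum_cons, hkey, sum_delta, ih ht]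
    have : (x.toList.headD 'a') = c := by rw [heq]; rfl
    rw [this, ← weight_eq_contrib c.toNat hlt]
    unfold pvWeight
    ring

theorem calc_points_spec : Claim_equal_calc_points := by
  intro sh hdom hpre
  unfold Spec_calc_points
  have hmem : ∀ x ∈ sh, pvDomStr x = true ∧ (x.toList.length == 1) = true :=
    fun x hx => ⟨List.all_eq_true.mp hdom x hx, List.all_eq_true.mp hpre x hx⟩
  -- left side: A's fold is the sum of per-item contributions
  have hA : calc_points sh = (sh.map (fun x => contribA ((x.toList.headD 'a').toNat))).sum := by
    unfold calc_points
    rw [PySem.List.foldl_congr_mem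
      (g := fun points x => points + contribA ((x.toList.headD 'a').toNat))]
    · rw [PySem.List.foldl_add, zero_add]
    · intro acc x hx
      obtain ⟨c, heq⟩ : ∃ c, x.toList = [c] := by
        have h1 := (hmem x hx).2
        cases hxl : x.toList with
        | nil => simp [hxl] at h1
        | cons a s => cases s with
          | nil => exact ⟨a, rfl⟩
          | cons b s' => simp [hxl] at h1
      rw [heq]
      have : ([c].headD 'a') = c := rfl
      simp only [contribA, this]
      split_ifs <;> ring
  -- right side: B's fold over the alphabet, with dict lookups turned into counts
  have hB : calc_points_alt sh = ((PySem.List.enumerate pvLetters).map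
      (fun p => (p.1 + 1) * (((sh.map (fun x => pvOrdKey x.toList)).count ((p.2.toNat : Int))) : Int))).sum := by
    have hcnt : ∀ v : Int, (sh.foldl (fun d x =>
          let k := pvOrdKey x.toList
          d.insert k (d.getD k 0 + 1)) PySem.Dict.empty).getD v 0
        = ((sh.map (fun x => pvOrdKey x.toList)).count v : Int) := by
      intro v
      rw [getD_fold_key]
      simp only [PySem.Dict.getD_empty, zero_add]
    unfold calc_points_alt
    show (PySem.List.enumerate pvLetters).foldl
        (fun acc p => acc + (p.1 + 1) * ((sh.foldl (fun d x =>
            let k := pvOrdKey x.toList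
            d.insert k (d.getD k 0 + 1)) PySem.Dict.empty).getD ((p.2.toNat : Int)) 0)) 0 = _
    simp only [hcnt]
    rw [PySem.List.foldl_add, zero_add]
  rw [hA, hB, sum_contrib_eq sh hmem]
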